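-- pv_equiv track=rewrite | github.com/OpenPAV/OpenPAV | code/evaluation/sample_scenarios.py | random_sample_product
-- ===== SOURCE A (Python) =====
-- import itertools
--
-- def random_sample_product(choices_list, sample_size):
--     sampled = []
--     count = 0
--     for item in itertools.product(*choices_list):  # 逐步生成组合
--         count += 1
--         if len(sampled) < sample_size:
--             sampled.append(item)  # 直接添加前 100 个
--         else:
--             return sampled
--     return sampled
-- ===== SOURCE B (Python) =====
-- def random_sample_product(choices_list, sample_size):
--     axes = [list(c) for c in choices_list]
--     total = 1
--     for axis in axes:
--         total *= len(axis)
--     m = min(sample_size, total)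
--     if m <= 0:
--         return []
--     headt = tuple(axis[0] for axis in axes)
--     rev_axes = axes[::-1]
--     out = []
--     for i in range(m):
--         idx = i
--         tail = []
--         rem = len(axes)
--         for axis in rev_axes:
--             if idx == 0:
--                 break
--             idx, r = divmod(idx, len(axis))
--             tail.append(axis[r])
--             rem -= 1
--         out.append(headt[:rem] + tuple(reversed(tail)))
--     return out
-- ===== Notes on version B (the rewrite author's own statement) =====
-- stated objective: alternative
-- what changed: Replaces lazy iteration of itertools.product by closed-form mixed-radix indexing: total = product of axis lengths, and each of the first min(sample_size, total) flat indices is decoded into its tuple by successive divmod from the last axis to the first.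
import Mathlib
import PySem

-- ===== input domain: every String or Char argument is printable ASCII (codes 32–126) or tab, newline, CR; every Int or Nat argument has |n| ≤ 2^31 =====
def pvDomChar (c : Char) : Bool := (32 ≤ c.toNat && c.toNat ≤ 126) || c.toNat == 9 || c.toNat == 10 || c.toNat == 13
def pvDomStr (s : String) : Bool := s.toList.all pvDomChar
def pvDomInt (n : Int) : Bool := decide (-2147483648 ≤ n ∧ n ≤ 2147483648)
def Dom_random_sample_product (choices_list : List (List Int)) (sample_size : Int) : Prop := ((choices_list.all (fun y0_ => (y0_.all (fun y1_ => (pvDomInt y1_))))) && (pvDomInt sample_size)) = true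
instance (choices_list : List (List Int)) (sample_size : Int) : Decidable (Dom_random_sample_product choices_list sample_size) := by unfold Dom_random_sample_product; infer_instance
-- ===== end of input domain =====

-- B replaces itertools.product iteration by closed-form mixed-radix decoding of flat
-- indices (alternative decomposition, same asymptotic cost).


-- ===== PORT A =====
-- itertools.product(*choices_list) in product order (leftmost axis varies slowest)
def pyProduct : List (List Int) → List (List Int)
  | [] => [[]]
  | xs :: rest => xs.flatMap (fun x => (pyProduct rest).map (fun t => x :: t))

-- the for-loop of A: count += 1; if len(sampled) < sample_size append, else return
def aLoop : List (List Int) → Int → List (List Int) → Int → List (List Int)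
  | [], _, sampled, _ => sampled
  | item :: rest, count, sampled, sample_size =>
    if (sampled.length : Int) < sample_size then
      aLoop rest (count + 1) (sampled ++ [item]) sample_size
    else sampled

def random_sample_product (choices_list : List (List Int)) (sample_size : Int) : List (List Int) :=
  aLoop (pyProduct choices_list) 0 [] sample_size

-- ===== PORT B =====
-- 'for axis in rev_axes: if idx == 0: break; idx, r = divmod(idx, len(axis)); tail.append(axis[r]); rem -= 1'
-- returns (tail in append order, rem = number of axes left unprocessed); axis[r] via pyGet?
-- is exact (r = idx % len is in range whenever the loop body runs, since then every axis is nonempty)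
def pvLoop : Int → List (List Int) → List Int × Nat
  | _, [] => ([], 0)
  | idx, axis :: rest =>
    if idx = 0 then ([], rest.length + 1)
    else
      let q := PySem.Int.floordiv idx (axis.length : Int)
      let r := PySem.Int.mod idx (axis.length : Int)
      let p := pvLoop q rest
      ((PySem.List.pyGet? axis r).getD 0 :: p.1, p.2)

def random_sample_product_alt (choices_list : List (List Int)) (sample_size : Int) : List (List Int) :=
  let total : Int := choices_list.foldl (fun acc axis => acc * (axis.length : Int)) 1
  let m := min sample_size total
  if m ≤ 0 then []
  else
    let headt := choices_list.map (fun a => (PySem.List.pyGet? a 0).getD 0)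
    let revAxes := choices_list.reverse
    (PySem.List.pyRange 0 m 1).map (fun i =>
      let p := pvLoop i revAxes
      headt.take p.2 ++ p.1.reverse)

-- ===== PRECONDITION & SPEC =====
def Spec_random_sample_product (choices_list : List (List Int)) (sample_size : Int) (out : List (List Int)) : Prop := out = random_sample_product_alt choices_list sample_size
instance (choices_list : List (List Int)) (sample_size : Int) (out : List (List Int)) : Decidable (Spec_random_sample_product choices_list sample_size out) := by unfold Spec_random_sample_product; infer_instance

-- ===== CLAIM (what is proved, stated in full; the proofs are below) =====
def Claim_equal_random_sample_product : Prop := ∀ (choices_list : List (List Int)) (sample_size : Int), Dom_random_sample_product choices_list sample_size → Spec_random_sample_product choices_list sample_size (random_sample_product choices_list sample_size)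

-- ===== LEMMAS AND PROOFS =====

def totalNat (ls : List (List Int)) : Nat := (ls.map List.length).prod

-- Nat-level reference decoder (index wraps with % at each axis, as the pvLoop digits do)
def decN : List (List Int) → Nat → List Int
  | [], _ => []
  | xs :: rest, i => xs.getD ((i / totalNat rest) % xs.length) 0 :: decN rest (i % totalNat rest)

theorem aLoop_eq_take (items : List (List Int)) :
    ∀ (count : Int) (sampled : List (List Int)) (n : Int),
      aLoop items count sampled n = sampled ++ items.take (n - sampled.length).toNat := by
  induction items with
  | nil => intro c s n; simp [aLoop]
  | cons item rest ih =>
    intro c s n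
    simp only [aLoop]
    split
    · rename_i h
      rw [ih]
      have h1 : (n - ((s ++ [item]).length : Int)).toNat = (n - s.length).toNat - 1 := by
        simp; omega
      have h2 : (n - (s.length : Int)).toNat = ((n - s.length).toNat - 1) + 1 := by omega
      rw [h1, h2, List.take_succ_cons, List.append_assoc, List.singleton_append]
      simp
    · rename_i h
      have : (n - (s.length : Int)).toNat = 0 := by omega
      simp [this]

theorem totalNat_append (ys : List (List Int)) (a : List Int) :
    totalNat (ys ++ [a]) = totalNat ys * a.length := by
  simp [totalNat]

theorem decN_zero (ls : List (List Int)) :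
    decN ls 0 = ls.map (fun a => a.getD 0 0) := by
  induction ls with
  | nil => simp [decN]
  | cons x rest ih => simp [decN, ih]

theorem decN_snoc (ys : List (List Int)) (a : List Int) :
    ∀ i : Nat, decN (ys ++ [a]) i = decN ys (i / a.length) ++ [a.getD (i % a.length) 0] := by
  induction ys with
  | nil => intro i; simp [decN, totalNat]
  | cons x ys' ih =>
    intro i
    simp only [List.cons_append, decN, ih, totalNat_append]
    have e1 : i / (totalNat ys' * a.length) = i / a.length / totalNat ys' := by
      rw [Nat.div_div_eq_div_mul, mul_comm]
    have e2 : i % (totalNat ys' * a.length) / a.length = i / a.length % totalNat ys' := by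
      rw [mul_comm, Nat.mod_mul_right_div_self]
    have e3 : i % (totalNat ys' * a.length) % a.length = i % a.length :=
      Nat.mod_mod_of_dvd _ (dvd_mul_left _ _)
    rw [e1, e2, e3]

theorem pvLoop_zero (rls : List (List Int)) : pvLoop 0 rls = ([], rls.length) := by
  cases rls <;> simp [pvLoop]

theorem pvLoop_j_le (rls : List (List Int)) : ∀ idx : Int, (pvLoop idx rls).2 ≤ rls.length := by
  induction rls with
  | nil => intro idx; simp [pvLoop]
  | cons axis rest ih =>
    intro idx
    simp only [pvLoop]
    split
    · simp
    · simpa using Nat.le_succ_of_le (ih _)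

theorem decode_eq (ls : List (List Int)) :
    ∀ i : Nat,
      (ls.map (fun a => (PySem.List.pyGet? a 0).getD 0)).take (pvLoop (i : Int) ls.reverse).2
        ++ (pvLoop (i : Int) ls.reverse).1.reverse = decN ls i := by
  induction ls using List.reverseRecOn with
  | nil => intro i; simp [pvLoop, decN]
  | append_singleton ys a ih =>
    intro i
    by_cases hi : i = 0
    · subst hi
      rw [Nat.cast_zero, pvLoop_zero, decN_zero]
      simp [PySem.List.pyGet?_zero, List.getD_eq_getElem?_getD]
    · have hne : ((i : Int)) ≠ 0 := by exact_mod_cast hi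
      rw [List.reverse_append]
      simp only [List.reverse_cons, List.reverse_nil, List.nil_append, List.singleton_append]
      simp only [pvLoop, if_neg hne, PySem.Int.floordiv_natCast, PySem.Int.mod_natCast]
      have hle : (pvLoop ((i / a.length : Nat) : Int) ys.reverse).2 ≤ ys.length := by
        simpa using pvLoop_j_le ys.reverse _
      rw [List.map_append, List.map_singleton, List.take_append_of_le_length (by simpa using hle),
        List.reverse_cons, ← List.append_assoc, ih, decN_snoc]
      simp only [List.getD_eq_getElem?_getD]
      rw [PySem.List.pyGet?_natCast]

theorem flat_lemma (T : Nat) (f : Nat → List Int) (hT : 0 < T) :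
    ∀ (xs : List Int), xs.flatMap (fun x => (List.range T).map (fun j => x :: f j))
      = (List.range (xs.length * T)).map (fun i => xs.getD (i / T) 0 :: f (i % T)) := by
  intro xs; induction xs with
  | nil => simp
  | cons x xs' ih =>
    simp only [List.flatMap_cons, ih, List.length_cons]
    have hsplit : (xs'.length + 1) * T = T + xs'.length * T := by ring
    rw [hsplit, List.range_add, List.map_append, List.map_map]
    congr 1
    · apply List.map_congr_left; intro j hj
      have hjT : j < T := List.mem_range.mp hj
      simp [Nat.div_eq_of_lt hjT, Nat.mod_eq_of_lt hjT]
    · apply List.map_congr_left; intro i _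
      simp only [Function.comp]
      have h1 : (T + i) / T = i / T + 1 := by rw [Nat.add_comm, Nat.add_div_right _ hT]
      have h2 : (T + i) % T = i % T := by rw [Nat.add_comm, Nat.add_mod_right]
      simp [h1, h2]

theorem pyProduct_eq_range (ls : List (List Int)) :
    pyProduct ls = (List.range (totalNat ls)).map (decN ls) := by
  induction ls with
  | nil => simp [pyProduct, totalNat, decN, List.range_one]
  | cons xs rest ih =>
    have hT : totalNat (xs :: rest) = xs.length * totalNat rest := by simp [totalNat]
    by_cases h0 : totalNat rest = 0
    · simp [pyProduct, ih, h0, hT]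
    · have hTpos : 0 < totalNat rest := Nat.pos_of_ne_zero h0
      simp only [pyProduct, ih, List.map_map]
      have key := flat_lemma (totalNat rest) (decN rest) hTpos xs
      rw [hT]
      refine Eq.trans (by exact key) ?_
      apply List.map_congr_left
      intro i hi
      have hlt : i < totalNat rest * xs.length := by
        rw [mul_comm]; exact List.mem_range.mp hi
      have hdivlt : i / totalNat rest < xs.length := Nat.div_lt_of_lt_mul hlt
      simp [decN, Nat.mod_eq_of_lt hdivlt]

theorem foldl_total (ls : List (List Int)) :
    ∀ acc : Int, ls.foldl (fun acc axis => acc * (axis.length : Int)) acc = acc * (totalNat ls : Int) := by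
  induction ls with
  | nil => intro acc; simp [totalNat]
  | cons xs rest ih =>
    intro acc
    simp only [List.foldl_cons, ih, totalNat, List.map_cons, List.prod_cons]
    push_cast; ring

-- ===== VERDICT (by name: the statement is the Claim_ definition above) =====
theorem random_sample_product_spec : Claim_equal_random_sample_product := by
  intro ls n _
  unfold Spec_random_sample_product random_sample_product
  rw [aLoop_eq_take, pyProduct_eq_range]
  simp only [random_sample_product_alt, foldl_total, one_mul, List.nil_append, List.length_nil,
    Nat.cast_zero, sub_zero]
  rw [← List.map_take, List.take_range]
  by_cases hm : min n ((totalNat ls : Nat) : Int) ≤ 0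
  · rw [if_pos hm]
    have h0 : min n.toNat (totalNat ls) = 0 := by omega
    rw [h0]; simp
  · rw [if_neg hm, PySem.List.pyRange_one]
    simp only [List.map_map, sub_zero]
    have hmin : (min n ((totalNat ls : Nat) : Int)).toNat = min n.toNat (totalNat ls) := by omega
    rw [hmin]
    apply List.map_congr_left
    intro k _
    simp only [Function.comp, zero_add]
    exact (decode_eq ls k).symm
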